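-- pv_equiv track=rewrite | github.com/seek-apps/qgre-engine | qgre/advantages.py | build_phase_qualities
-- ===== SOURCE A (Python) =====
-- def build_phase_qualities(
--     step_qualities: dict[int, list[str]],
--     cumulative: bool = True,
-- ) -> dict[int, list[str]]:
--     """Build phase→qualities mapping from step_qualities config.
--
--     If cumulative=True (default QGRE behavior): phase N includes all qualities from steps 1..N.
--     If cumulative=False: phase N includes only step N's qualities.
--     """
--     steps = sorted(step_qualities.keys())
--     if cumulative:
--         return {
--             phase: [q for s in steps if s <= phase for q in step_qualities[s]]
--             for phase in steps
--         }
--     else: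
--         return dict(step_qualities)
-- ===== SOURCE B (Python) =====
-- def build_phase_qualities(
--     step_qualities: dict[int, list[str]],
--     cumulative: bool = True,
-- ) -> dict[int, list[str]]:
--     """Single pass over items in key order, maintaining a running prefix list
--     and snapshotting it per phase (instead of rescanning all steps per phase)."""
--     if not cumulative:
--         return dict(step_qualities)
--     out = {}
--     prefix = []
--     for step, qualities in sorted(step_qualities.items(), key=lambda kv: kv[0]):
--         prefix.extend(qualities)
--         out[step] = prefix.copy()
--     return out
-- ===== Notes on version B (the rewrite author's own statement) =====
-- stated objective: alternative
-- what changed: Replaces the per-phase rescan of all steps (nested comprehension with a dict lookup per step) by one pass over the sorted items that maintains a running prefix list and snapshots it for each phase; both remain bound by the size of the cumulative output, so no speed is claimed.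
import Mathlib
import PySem

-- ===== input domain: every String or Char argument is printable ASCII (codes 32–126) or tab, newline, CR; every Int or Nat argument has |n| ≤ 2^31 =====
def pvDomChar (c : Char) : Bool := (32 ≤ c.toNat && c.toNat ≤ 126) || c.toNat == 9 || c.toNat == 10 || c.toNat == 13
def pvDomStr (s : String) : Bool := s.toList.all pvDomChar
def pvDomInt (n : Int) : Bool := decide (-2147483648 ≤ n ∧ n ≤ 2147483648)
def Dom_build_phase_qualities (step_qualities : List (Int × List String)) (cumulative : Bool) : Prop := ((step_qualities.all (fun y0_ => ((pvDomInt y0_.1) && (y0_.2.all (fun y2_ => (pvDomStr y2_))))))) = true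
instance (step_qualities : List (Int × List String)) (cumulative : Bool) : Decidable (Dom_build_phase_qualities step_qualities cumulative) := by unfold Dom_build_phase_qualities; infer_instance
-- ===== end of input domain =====

-- B replaces A's per-phase rescan of all steps by one pass over the sorted items
-- keeping a running prefix list and snapshotting it per phase (objective: alternative).


-- ===== PORT A =====
def build_phase_qualities (step_qualities : List (Int × List String)) (cumulative : Bool) : List (Int × List String) :=
  let d := PySem.Dict.ofList step_qualities
  let steps := PySem.List.sorted d.keys (fun k => k)
  if cumulative then
    -- dict comprehension over the distinct sorted keys: one entry per phase, in key order
    steps.map (fun phase =>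
      (phase, (steps.filter (fun s => decide (s ≤ phase))).flatMap (fun s => d.getD s [])))
  else
    d.items

-- ===== PORT B =====
def build_phase_qualities_alt (step_qualities : List (Int × List String)) (cumulative : Bool) : List (Int × List String) :=
  let d := PySem.Dict.ofList step_qualities
  if !cumulative then d.items
  else
    -- out[step] = prefix over fresh distinct keys appends, so out is the appended list
    ((PySem.List.sorted d.items (fun kv => kv.1)).foldl
        (fun st kv => (st.1 ++ kv.2, st.2 ++ [(kv.1, st.1 ++ kv.2)]))
        (([] : List String), ([] : List (Int × List String)))).2

-- ===== PRECONDITION & SPEC =====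
def Spec_build_phase_qualities (step_qualities : List (Int × List String)) (cumulative : Bool) (out : List (Int × List String)) : Prop := out = build_phase_qualities_alt step_qualities cumulative
instance (step_qualities : List (Int × List String)) (cumulative : Bool) (out : List (Int × List String)) : Decidable (Spec_build_phase_qualities step_qualities cumulative out) := by unfold Spec_build_phase_qualities; infer_instance

-- ===== CLAIM (what is proved, stated in full; the proofs are below) =====
def Claim_equal_build_phase_qualities : Prop := ∀ (step_qualities : List (Int × List String)) (cumulative : Bool), Dom_build_phase_qualities step_qualities cumulative → Spec_build_phase_qualities step_qualities cumulative (build_phase_qualities step_qualities cumulative)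

-- ===== LEMMAS AND PROOFS =====

lemma bpq_loop (f : Int → List String) :
    ∀ (t : List Int), t.Pairwise (· < ·) → ∀ (pre : List String) (out : List (Int × List String)),
      ((t.map (fun k => (k, f k))).foldl
          (fun st kv => (st.1 ++ kv.2, st.2 ++ [(kv.1, st.1 ++ kv.2)])) (pre, out)).2
      = out ++ t.map (fun p => (p, pre ++ (t.filter (fun s => decide (s ≤ p))).flatMap f)) := by
  intro t
  induction t with
  | nil => intro _ pre out; simp
  | cons k rest ih =>
    intro hpw pre out
    have hk : ∀ p ∈ rest, k < p := fun p hp => List.rel_of_pairwise_cons hpw hp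
    have hrest := hpw.of_cons
    have h1 : (decide (k ≤ k)) = true := by simp
    have h2 : rest.filter (fun s => decide (s ≤ k)) = [] := by
      rw [List.filter_eq_nil_iff]; intro p hp
      simp only [decide_eq_true_eq]; exact not_le.mpr (hk p hp)
    simp only [List.map_cons, List.foldl_cons]
    rw [ih hrest]
    simp only [List.filter_cons, h1, if_true, h2, List.flatMap_cons, List.flatMap_nil,
      List.append_nil, List.append_assoc, List.cons_append, List.nil_append]
    congr 1
    congr 1
    apply List.map_congr_left
    intro p hp
    have hkp : (decide (k ≤ p)) = true := by simpa using le_of_lt (hk p hp)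
    rw [hkp]
    simp

-- ===== VERDICT (by name: the statement is the Claim_ definition above) =====
theorem build_phase_qualities_spec : Claim_equal_build_phase_qualities := by
  intro sq cumulative _
  unfold Spec_build_phase_qualities
  cases cumulative with
  | false => simp [build_phase_qualities, build_phase_qualities_alt]
  | true =>
    simp only [build_phase_qualities, build_phase_qualities_alt, Bool.not_true, if_true,
      Bool.false_eq_true, if_false]
    set d := PySem.Dict.ofList sq with hd
    set steps := PySem.List.sorted d.keys (fun k => k) with hs
    have hnd : d.keys.Nodup := PySem.Dict.nodup_keys_ofList sq
    have hsp : steps.Perm d.keys := PySem.List.sorted_perm d.keys (fun k => k) false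
    have hnds : steps.Nodup := (hsp.nodup_iff).mpr hnd
    have hle : steps.Pairwise (· ≤ ·) := PySem.List.sorted_pairwise d.keys (fun k => k)
    have hlt : steps.Pairwise (· < ·) :=
      (hle.and hnds).imp (fun h => lt_of_le_of_ne h.1 h.2)
    have hitems : PySem.List.sorted d.items (fun kv => kv.1)
        = steps.map (fun k => (k, d.getD k [])) := by
      apply PySem.List.sorted_eq_of_perm_of_pairwise_lt
      · rw [PySem.Dict.items_eq_map_keys d hnd ([] : List String)]
        exact hsp.map _
      · exact List.pairwise_map.mpr hlt
    rw [hitems, bpq_loop (fun s => d.getD s []) steps hlt [] []]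
    simp
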